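-- pv_equiv track=rewrite | github.com/m1sterzer0/codejams | julia/work/2017/WF/B.py | compressCards
-- ===== SOURCE A (Python) =====
-- from operator        import mul
-- from functools       import reduce
--
-- def compressCards(O,V) :
--     possum = 0
--     negsum = 0
--     posmul = 1
--     posdiv = 1
--     negmul = []
--     negdiv = []
--     zeromul = False
--     for (o,v) in zip(O,V) :
--         if v == 0 :
--             if o == '*' :
--                 zeromul = True
--         elif v < 0 :
--             if   o == '+' : negsum += v
--             elif o == '-' : possum -= v
--             elif o == '*' : negmul.append(v)
--             elif o == '/' : negdiv.append(v)
--         else :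
--             if   o == '+' : possum += v
--             elif o == '-' : negsum -= v
--             elif o == '*' : posmul *= v
--             elif o == '/' : posdiv *= v
--     O2,V2 = [],[]
--     if possum > 0 :
--         O2.append("+"); V2.append(possum)
--     if negsum < 0 :
--         O2.append("+"); V2.append(negsum)
--     if posmul > 1 :
--         O2.append("*"); V2.append(posmul)
--     if posdiv > 1 :
--         O2.append("/"); V2.append(posdiv)
--     if zeromul :
--         O2.append("*"); V2.append(0)
--     negmul.sort()
--     if negmul : O2.append("*"); V2.append(negmul.pop())
--     if negmul : O2.append("*"); V2.append(negmul.pop())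
--     if negmul : O2.append("*"); V2.append(reduce(mul,negmul,1))
--     negdiv.sort()
--     if negdiv : O2.append("/"); V2.append(negdiv.pop())
--     if negdiv : O2.append("/"); V2.append(negdiv.pop())
--     if negdiv : O2.append("/"); V2.append(reduce(mul,negdiv,1))
--     return (O2,V2)
-- ===== SOURCE B (Python) =====
-- from operator import mul
-- from functools import reduce
--
-- def compressCards(O, V):
--     pairs = list(zip(O, V))
--
--     def agg(op, sign):
--         return [v for o, v in pairs if o == op and v * sign > 0]
--
--     def negpart(op):
--         xs = sorted(agg(op, -1), reverse=True)
--         out = [(op, x) for x in xs[:2]]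
--         if len(xs) > 2:
--             out.append((op, reduce(mul, xs[2:], 1)))
--         return out
--
--     entries = []
--     possum = sum(agg('+', 1)) - sum(agg('-', -1))
--     if possum > 0:
--         entries.append(('+', possum))
--     negsum = sum(agg('+', -1)) - sum(agg('-', 1))
--     if negsum < 0:
--         entries.append(('+', negsum))
--     posmul = reduce(mul, agg('*', 1), 1)
--     if posmul > 1:
--         entries.append(('*', posmul))
--     posdiv = reduce(mul, agg('/', 1), 1)
--     if posdiv > 1:
--         entries.append(('/', posdiv))
--     if any(o == '*' and v == 0 for o, v in pairs):
--         entries.append(('*', 0))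
--     entries += negpart('*') + negpart('/')
--     return ([o for o, _ in entries], [v for _, v in entries])
-- ===== Notes on version B (the rewrite author's own statement) =====
-- stated objective: alternative
-- what changed: Replaces the single 7-accumulator classification loop by independent filtered passes (one comprehension per aggregate) over zip(O,V), builds the result as one list of (op,value) entries that is unzipped at the end, and replaces sort-ascending-then-pop-from-the-end-twice by sort-descending-then-take-the-first-two-and-fold-the-rest.
import Mathlib
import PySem

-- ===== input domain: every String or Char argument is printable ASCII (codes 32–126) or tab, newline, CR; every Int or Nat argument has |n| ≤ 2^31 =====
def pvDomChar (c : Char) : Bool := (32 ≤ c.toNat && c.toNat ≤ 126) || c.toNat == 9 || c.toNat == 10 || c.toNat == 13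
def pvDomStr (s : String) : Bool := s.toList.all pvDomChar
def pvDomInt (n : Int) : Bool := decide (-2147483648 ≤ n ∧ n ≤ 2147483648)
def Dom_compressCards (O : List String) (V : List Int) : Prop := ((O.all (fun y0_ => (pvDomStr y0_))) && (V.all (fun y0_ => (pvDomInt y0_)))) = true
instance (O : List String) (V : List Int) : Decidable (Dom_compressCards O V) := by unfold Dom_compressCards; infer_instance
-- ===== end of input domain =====

-- B restructures A: per-aggregate filtered passes and a descending sort with take-2,
-- assembled as one (op,value) entry list and unzipped; same cost, different decomposition.

-- ===== PORT A =====
-- loop body of A's single classification loop, state (possum, negsum, posmul, posdiv, negmul, negdiv, zeromul)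
def pvStepA (st : Int × Int × Int × Int × List Int × List Int × Bool) (p : String × Int) :
    Int × Int × Int × Int × List Int × List Int × Bool :=
  let (ps, ns, pm, pd, nm, nd, zm) := st
  let (o, v) := p
  if v = 0 then
    if o = "*" then (ps, ns, pm, pd, nm, nd, true) else (ps, ns, pm, pd, nm, nd, zm)
  else if v < 0 then
    if o = "+" then (ps, ns + v, pm, pd, nm, nd, zm)
    else if o = "-" then (ps - v, ns, pm, pd, nm, nd, zm)
    else if o = "*" then (ps, ns, pm, pd, nm ++ [v], nd, zm)
    else if o = "/" then (ps, ns, pm, pd, nm, nd ++ [v], zm)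
    else (ps, ns, pm, pd, nm, nd, zm)
  else
    if o = "+" then (ps + v, ns, pm, pd, nm, nd, zm)
    else if o = "-" then (ps, ns - v, pm, pd, nm, nd, zm)
    else if o = "*" then (ps, ns, pm * v, pd, nm, nd, zm)
    else if o = "/" then (ps, ns, pm, pd * v, nm, nd, zm)
    else (ps, ns, pm, pd, nm, nd, zm)

-- A's repeated tail block: sort ascending, pop the last element twice, reduce(mul, rest, 1)
def pvPopTwoA (op : String) (xs0 : List Int) (O2 : List String) (V2 : List Int) :
    List String × List Int :=
  let xs := PySem.List.sorted xs0 (fun x => x)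
  let O2 := if xs = [] then O2 else O2 ++ [op]
  let V2 := if xs = [] then V2 else V2 ++ [xs.getLast!]
  let xs := if xs = [] then xs else xs.dropLast
  let O2 := if xs = [] then O2 else O2 ++ [op]
  let V2 := if xs = [] then V2 else V2 ++ [xs.getLast!]
  let xs := if xs = [] then xs else xs.dropLast
  let O2 := if xs = [] then O2 else O2 ++ [op]
  let V2 := if xs = [] then V2 else V2 ++ [xs.foldl (· * ·) 1]
  (O2, V2)

def compressCards (O : List String) (V : List Int) : List String × List Int :=
  let (possum, negsum, posmul, posdiv, negmul, negdiv, zeromul) :=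
    (List.zip O V).foldl pvStepA (0, 0, 1, 1, ([] : List Int), ([] : List Int), false)
  let O2 : List String := []
  let V2 : List Int := []
  let O2 := if possum > 0 then O2 ++ ["+"] else O2
  let V2 := if possum > 0 then V2 ++ [possum] else V2
  let O2 := if negsum < 0 then O2 ++ ["+"] else O2
  let V2 := if negsum < 0 then V2 ++ [negsum] else V2
  let O2 := if posmul > 1 then O2 ++ ["*"] else O2
  let V2 := if posmul > 1 then V2 ++ [posmul] else V2
  let O2 := if posdiv > 1 then O2 ++ ["/"] else O2
  let V2 := if posdiv > 1 then V2 ++ [posdiv] else V2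
  let O2 := if zeromul then O2 ++ ["*"] else O2
  let V2 := if zeromul then V2 ++ [(0 : Int)] else V2
  let (O2, V2) := pvPopTwoA "*" negmul O2 V2
  let (O2, V2) := pvPopTwoA "/" negdiv O2 V2
  (O2, V2)

-- ===== PORT B =====
-- [v for o, v in pairs if o == op and v * sign > 0]
def pvAgg (pairs : List (String × Int)) (op : String) (sign : Int) : List Int :=
  (pairs.filter (fun p => decide (p.1 = op) && decide (p.2 * sign > 0))).map Prod.snd

-- B's negpart: sort descending, the first two entries, then the product of the rest
def pvNegpart (pairs : List (String × Int)) (op : String) : List (String × Int) :=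
  let xs := PySem.List.sorted (pvAgg pairs op (-1)) (fun x => x) true
  let out := (xs.take 2).map (fun x => (op, x))
  if 2 < xs.length then out ++ [(op, (xs.drop 2).foldl (· * ·) 1)] else out

def compressCards_alt (O : List String) (V : List Int) : List String × List Int :=
  let pairs := List.zip O V
  let entries : List (String × Int) := []
  let possum := (pvAgg pairs "+" 1).sum - (pvAgg pairs "-" (-1)).sum
  let entries := if possum > 0 then entries ++ [("+", possum)] else entries
  let negsum := (pvAgg pairs "+" (-1)).sum - (pvAgg pairs "-" 1).sum
  let entries := if negsum < 0 then entries ++ [("+", negsum)] else entries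
  let posmul := (pvAgg pairs "*" 1).foldl (· * ·) 1
  let entries := if posmul > 1 then entries ++ [("*", posmul)] else entries
  let posdiv := (pvAgg pairs "/" 1).foldl (· * ·) 1
  let entries := if posdiv > 1 then entries ++ [("/", posdiv)] else entries
  let entries := if pairs.any (fun p => p.1 == "*" && p.2 == 0) then entries ++ [("*", (0 : Int))] else entries
  let entries := entries ++ pvNegpart pairs "*" ++ pvNegpart pairs "/"
  (entries.map Prod.fst, entries.map Prod.snd)

-- ===== PRECONDITION & SPEC =====
def Spec_compressCards (O : List String) (V : List Int) (out : List String × List Int) : Prop := out = compressCards_alt O V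
instance (O : List String) (V : List Int) (out : List String × List Int) : Decidable (Spec_compressCards O V out) := by unfold Spec_compressCards; infer_instance

-- ===== CLAIM (what is proved, stated in full; the proofs are below) =====
def Claim_equal_compressCards : Prop := ∀ (O : List String) (V : List Int), Dom_compressCards O V → Spec_compressCards O V (compressCards O V)

-- ===== LEMMAS AND PROOFS =====

lemma pvFoldlMul (l : List Int) (a : Int) : l.foldl (· * ·) a = a * l.prod := by
  induction l generalizing a with
  | nil => simp
  | cons x t ih => simp [ih, mul_assoc]

-- sorted(xs) is sorted(xs, reverse=True) read backwards (for Int values)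
lemma pvSortedRev (xs : List Int) :
    PySem.List.sorted xs (fun x => x) = (PySem.List.sorted xs (fun x => x) true).reverse := by
  apply PySem.List.eq_of_perm_of_pairwise_le_of_injective (fun x : Int => x) (fun _ _ h => h)
  · exact (PySem.List.sorted_perm xs _ false).trans ((PySem.List.sorted_perm xs _ true).symm.trans
      (List.reverse_perm _).symm)
  · exact PySem.List.sorted_pairwise xs _
  · exact List.pairwise_reverse.mpr (PySem.List.sorted_pairwise_rev xs _)

-- A's fold = B's independent passes
lemma pvFold (l : List (String × Int)) (ps ns pm pd : Int) (nm nd : List Int) (zm : Bool) :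
    l.foldl pvStepA (ps, ns, pm, pd, nm, nd, zm) =
      (ps + (pvAgg l "+" 1).sum - (pvAgg l "-" (-1)).sum,
       ns + (pvAgg l "+" (-1)).sum - (pvAgg l "-" 1).sum,
       pm * (pvAgg l "*" 1).foldl (· * ·) 1,
       pd * (pvAgg l "/" 1).foldl (· * ·) 1,
       nm ++ pvAgg l "*" (-1),
       nd ++ pvAgg l "/" (-1),
       zm || l.any (fun p => p.1 == "*" && p.2 == 0)) := by
  induction l generalizing ps ns pm pd nm nd zm with
  | nil => simp [pvAgg]
  | cons p t ih =>
    obtain ⟨o, v⟩ := p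
    simp only [List.foldl_cons, pvStepA]
    split_ifs <;> rw [ih] <;>
      (try simp [pvAgg, List.filter_cons, pvFoldlMul, Prod.mk.injEq, *])
    all_goals (try constructor) <;>
      (try (first | rw [if_neg (by omega)] | rw [if_pos (by omega)])) <;>
      (try rw [show (o == "*") = false from by simp [‹¬o = "*"›]]) <;>
      (try rw [show (v == (0:Int)) = false from by simp [‹¬v = (0:Int)›]]) <;>
      (try simp [pvFoldlMul]) <;>
      first | rfl | omega | ring

-- A's sort/pop/pop/reduce block = append B's negpart entries, unzipped
lemma pvPopTwo_eq (pairs : List (String × Int)) (op : String) (O2 : List String) (V2 : List Int) :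
    pvPopTwoA op (pvAgg pairs op (-1)) O2 V2
      = (O2 ++ (pvNegpart pairs op).map Prod.fst, V2 ++ (pvNegpart pairs op).map Prod.snd) := by
  unfold pvPopTwoA pvNegpart
  rw [pvSortedRev]
  generalize PySem.List.sorted (pvAgg pairs op (-1)) (fun x => x) true = R
  rcases R with _ | ⟨a, _ | ⟨b, _ | ⟨c, t⟩⟩⟩
  · simp
  · simp [List.getLast!]
  · simp [List.getLast!]
  · simp [pvFoldlMul, List.prod_eq_foldr, mul_comm]

-- ===== VERDICT (by name: the statement is the Claim_ definition above) =====
theorem compressCards_spec : Claim_equal_compressCards := by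
  intro O V _
  unfold Spec_compressCards compressCards compressCards_alt
  rw [pvFold]
  simp only [zero_add, one_mul, List.nil_append, Bool.false_or]
  rw [pvPopTwo_eq, pvPopTwo_eq]
  simp only [List.map_append, List.append_assoc]
  split_ifs <;> simp
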